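-- pv_equiv track=rewrite | github.com/ComPWA/policy | src/repoma/check_dev_files/pytest.py | __split_options
-- ===== SOURCE A (Python) =====
-- def __split_options(arg: str) -> list[str]:
--     """Split a string of options into a list of options.
--
--     >>> __split_options('-abc def -ghi "j k l" -mno pqr')
--     ['-abc def', '-ghi "j k l"', '-mno pqr']
--     """
--     elements = arg.split()
--     options: list[str] = []
--     for i in range(len(elements)):
--         if i > 0 and not elements[i].startswith("-"):
--             options[-1] += f" {elements[i]}"
--         else:
--             options.append(elements[i])
--     return options
-- ===== SOURCE B (Python) =====
-- import re
--
-- def __split_options(arg: str) -> list[str]: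
--     """Split a string of options into a list of options."""
--     normalized = " ".join(arg.split())
--     if not normalized:
--         return []
--     return re.split(r" (?=-)", normalized)
-- ===== Notes on version B (the rewrite author's own statement) =====
-- stated objective: idiomatic
-- what changed: Replaces the indexed grouping loop with in-place concatenation onto options[-1] by a single regex split (re.split(r' (?=-)')) of the whitespace-normalized string, with an empty-input guard.
import Mathlib
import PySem

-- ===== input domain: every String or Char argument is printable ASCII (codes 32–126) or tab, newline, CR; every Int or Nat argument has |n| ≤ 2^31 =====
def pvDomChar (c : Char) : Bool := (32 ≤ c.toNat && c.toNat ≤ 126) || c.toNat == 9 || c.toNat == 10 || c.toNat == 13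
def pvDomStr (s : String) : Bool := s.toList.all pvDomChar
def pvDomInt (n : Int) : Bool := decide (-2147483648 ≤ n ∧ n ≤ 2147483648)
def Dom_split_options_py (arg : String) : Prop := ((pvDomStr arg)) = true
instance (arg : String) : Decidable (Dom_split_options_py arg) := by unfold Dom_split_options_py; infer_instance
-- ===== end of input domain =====

-- B replaces A's indexed grouping loop by one regex split (before every dash token) of the
-- whitespace-normalized string; objective: idiomatic. Equal return value on every input.

-- ===== PORT A =====
-- options[-1] += s (Python raises on an empty list; unreachable here: iteration i = 0 always appends)
def pvAppendLast : List String → String → List String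
  | [], _ => []
  | [x], s => [String.ofList (x.toList ++ s.toList)]
  | x :: xs, s => x :: pvAppendLast xs s

def split_options_py (arg : String) : List String :=
  let elements := PySem.Str.split₀ arg
  (PySem.List.pyRange 0 (elements.length : Int) 1).foldl
    (fun options i =>
      if 0 < i ∧ ¬ (PySem.Str.startswith (PySem.List.pyGetD elements i "") "-") then
        pvAppendLast options (String.ofList (' ' :: (PySem.List.pyGetD elements i "").toList))
      else
        options ++ [PySem.List.pyGetD elements i ""])
    []

-- ===== PORT B =====
-- hand port of re.split(r" (?=-)", s): exact for this fixed pattern — cut at every ' ' whose next char is '-'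
def pvReSplitDash : List Char → List Char → List (List Char)
  | cur, [] => [cur.reverse]
  | cur, c :: rest =>
    if c = ' ' ∧ rest.head? = some '-' then cur.reverse :: pvReSplitDash [] rest
    else pvReSplitDash (c :: cur) rest

def split_options_py_alt (arg : String) : List String :=
  let normalized := PySem.Str.join " " (PySem.Str.split₀ arg)
  if normalized = "" then []
  else (pvReSplitDash [] normalized.toList).map String.ofList

-- ===== PRECONDITION & SPEC =====
def Spec_split_options_py (arg : String) (out : List String) : Prop := out = split_options_py_alt arg
instance (arg : String) (out : List String) : Decidable (Spec_split_options_py arg out) := by unfold Spec_split_options_py; infer_instance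

-- ===== CLAIM (what is proved, stated in full; the proofs are below) =====
def Claim_equal_split_options_py : Prop := ∀ (arg : String), Dom_split_options_py arg → Spec_split_options_py arg (split_options_py arg)

-- ===== LEMMAS AND PROOFS =====

-- A's loop, started after the first token has been appended
def pvFoldA (opts : List String) (ts : List String) : List String :=
  ts.foldl
    (fun options e =>
      if ¬ (PySem.Str.startswith e "-") then
        pvAppendLast options (String.ofList (' ' :: e.toList))
      else options ++ [e])
    opts

-- the tail of ' '.join: a space before each token
def pvSepJoin (ts : List (List Char)) : List Char := (ts.map (fun t => ' ' :: t)).flatten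

lemma pvSepJoin_cons (t : List Char) (ts : List (List Char)) :
    pvSepJoin (t :: ts) = ' ' :: (t ++ pvSepJoin ts) := by
  simp [pvSepJoin]

lemma pvJoin_cons (t : List Char) (ts : List (List Char)) :
    PySem.Chars.join [' '] (t :: ts) = t ++ pvSepJoin ts := by
  induction ts generalizing t with
  | nil => simp [PySem.Chars.join, pvSepJoin, List.intercalate]
  | cons u us ih =>
    simp only [PySem.Chars.join, List.intercalate] at *
    simp [List.intersperse, pvSepJoin_cons] at *
    simp [ih u]

lemma pvAppendLast_append (opts : List String) (g s : String) :
    pvAppendLast (opts ++ [g]) s = opts ++ [String.ofList (g.toList ++ s.toList)] := by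
  induction opts with
  | nil => simp [pvAppendLast]
  | cons x xs ih =>
    cases xs with
    | nil => simp [pvAppendLast]
    | cons y ys => simp [pvAppendLast] at *; exact ih

lemma pvReSplitDash_copy (l : List Char) (h : ∀ c ∈ l, c ≠ ' ') :
    ∀ (cur s : List Char), pvReSplitDash cur (l ++ s) = pvReSplitDash (l.reverse ++ cur) s := by
  induction l with
  | nil => intro cur s; simp
  | cons c cs ih =>
    intro cur s
    have hc : c ≠ ' ' := h c (by simp)
    have hcs : ∀ x ∈ cs, x ≠ ' ' := fun x hx => h x (by simp [hx])
    have hstep : pvReSplitDash cur ((c :: cs) ++ s) = pvReSplitDash (c :: cur) (cs ++ s) := by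
      show pvReSplitDash cur (c :: (cs ++ s)) = _
      simp only [pvReSplitDash]
      rw [if_neg (by simp [hc])]
    rw [hstep, ih hcs (c :: cur) s]
    simp

lemma pvSplit0_go_tokens : ∀ (s cur : List Char) (acc : List (List Char)),
    (∀ c ∈ cur, PySem.Chars.isspace c = false) →
    (∀ t ∈ acc, t ≠ [] ∧ ∀ c ∈ t, PySem.Chars.isspace c = false) →
    ∀ t ∈ PySem.Chars.split₀.go s cur acc, t ≠ [] ∧ ∀ c ∈ t, PySem.Chars.isspace c = false := by
  intro s
  induction s with
  | nil =>
    intro cur acc hcur hacc t ht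
    simp only [PySem.Chars.split₀.go] at ht
    by_cases hc : cur = []
    · rw [if_pos (by simp [hc])] at ht
      exact hacc t (by simpa using ht)
    · rw [if_neg (by simp [hc])] at ht
      simp only [List.mem_reverse, List.mem_cons] at ht
      rcases ht with h | h
      · subst h
        exact ⟨by simpa using hc, fun x hx => hcur x (by simpa using hx)⟩
      · exact hacc t h
  | cons c rest ih =>
    intro cur acc hcur hacc t ht
    by_cases hsp : PySem.Chars.isspace c = true
    · simp only [PySem.Chars.split₀.go] at ht
      rw [if_pos hsp] at ht
      by_cases hc : cur = []
      · rw [if_pos (by simp [hc])] at ht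
        exact ih [] acc (by simp) hacc t ht
      · rw [if_neg (by simp [hc])] at ht
        refine ih [] (cur.reverse :: acc) (by simp) ?_ t ht
        intro u hu
        rcases List.mem_cons.mp hu with hu | hu
        · subst hu
          exact ⟨by simpa using hc, fun x hx => hcur x (by simpa using hx)⟩
        · exact hacc u hu
    · simp only [PySem.Chars.split₀.go] at ht
      rw [if_neg hsp] at ht
      refine ih (c :: cur) acc ?_ hacc t ht
      intro x hx
      rcases List.mem_cons.mp hx with hx | hx
      · subst hx; simpa using hsp
      · exact hcur x hx

lemma pvTokens (arg : String) :
    ∀ t ∈ PySem.Str.split₀ arg, t.toList ≠ [] ∧ ∀ c ∈ t.toList, c ≠ ' ' := by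
  intro t ht
  simp only [PySem.Str.split₀, List.mem_map] at ht
  obtain ⟨u, hu, rfl⟩ := ht
  have := pvSplit0_go_tokens arg.toList [] [] (by simp) (by simp) u hu
  refine ⟨by simpa using this.1, ?_⟩
  intro c hc
  have hns := this.2 c (by simpa using hc)
  intro hcs
  subst hcs
  simp [PySem.Chars.isspace] at hns

lemma pvMain (ts : List String) :
    (∀ t ∈ ts, t.toList ≠ [] ∧ ∀ c ∈ t.toList, c ≠ ' ') →
    ∀ (opts : List String) (g : String),
      pvFoldA (opts ++ [g]) ts =
        opts ++ (pvReSplitDash g.toList.reverse (pvSepJoin (ts.map String.toList))).map String.ofList := by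
  induction ts with
  | nil => intro _ opts g; simp [pvFoldA, pvReSplitDash, pvSepJoin]
  | cons t ts ih =>
    intro h opts g
    have ht := h t (by simp)
    have hts : ∀ u ∈ ts, u.toList ≠ [] ∧ ∀ c ∈ u.toList, c ≠ ' ' :=
      fun u hu => h u (by simp [hu])
    obtain ⟨hne, hnosp⟩ := ht
    obtain ⟨c, cs, hct⟩ := List.exists_cons_of_ne_nil hne
    simp only [List.map_cons, pvSepJoin_cons]
    by_cases hsw : PySem.Str.startswith t "-" = true
    · -- t starts with '-': A opens a new group, B cuts before it
      have hc : c = '-' := by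
        have h0 : PySem.Chars.startswith t.toList ['-'] = true := by simpa using hsw
        rw [hct] at h0
        have h1 : '-' = c := by simpa [PySem.Chars.startswith, List.isPrefixOf] using h0
        exact h1.symm
      have hcut : pvReSplitDash g.toList.reverse (' ' :: (t.toList ++ pvSepJoin (ts.map String.toList)))
          = g.toList.reverse.reverse ::
            pvReSplitDash (t.toList.reverse ++ []) (pvSepJoin (ts.map String.toList)) := by
        rw [← pvReSplitDash_copy t.toList hnosp [] _]
        simp [pvReSplitDash, hct, hc]
      rw [hcut]
      simp only [List.reverse_reverse, List.append_nil, List.map_cons, String.ofList_toList]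
      have hstep : pvFoldA (opts ++ [g]) (t :: ts) = pvFoldA ((opts ++ [g]) ++ [t]) ts := by
        simp only [pvFoldA, List.foldl_cons]
        rw [if_neg (by simpa using hsw)]
      rw [hstep, ih hts (opts ++ [g]) t]
      simp
    · -- t does not start with '-': A appends " t" to the last group, B keeps copying
      have hc : c ≠ '-' := by
        intro hc
        apply hsw
        simp only [PySem.Str.startswith_eq]
        simp [PySem.Chars.startswith, hct, hc, List.isPrefixOf]
      have hnocut : pvReSplitDash g.toList.reverse (' ' :: (t.toList ++ pvSepJoin (ts.map String.toList)))
          = pvReSplitDash (t.toList.reverse ++ ' ' :: g.toList.reverse) (pvSepJoin (ts.map String.toList)) := by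
        rw [pvReSplitDash]
        rw [if_neg (by simp [hct, hc])]
        exact pvReSplitDash_copy t.toList hnosp (' ' :: g.toList.reverse) _
      rw [hnocut]
      have hstep : pvFoldA (opts ++ [g]) (t :: ts)
          = pvFoldA (opts ++ [String.ofList (g.toList ++ ' ' :: t.toList)]) ts := by
        simp only [pvFoldA, List.foldl_cons]
        rw [if_pos (by simpa using hsw), pvAppendLast_append]
        simp
      rw [hstep, ih hts opts (String.ofList (g.toList ++ ' ' :: t.toList))]
      simp [List.reverse_append]

lemma pvPortA_eq (arg : String) :
    split_options_py arg =
      match PySem.Str.split₀ arg with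
      | [] => []
      | t :: rest => pvFoldA [t] rest := by
  unfold split_options_py
  cases hel : PySem.Str.split₀ arg with
  | nil => simp
  | cons t rest =>
    simp only []
    have hlen : (0 : Int) < ((t :: rest).length : Int) := by
      simp
    rw [PySem.List.pyRange_one_cons hlen]
    simp only [List.foldl_cons]
    rw [if_neg (by simp)]
    rw [PySem.List.pyGetD_zero_cons]
    have hcongr :
        (PySem.List.pyRange 1 ((t :: rest).length : Int) 1).foldl
          (fun options i =>
            if 0 < i ∧ ¬ (PySem.Str.startswith (PySem.List.pyGetD (t :: rest) i "") "-") then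
              pvAppendLast options (String.ofList (' ' :: (PySem.List.pyGetD (t :: rest) i "").toList))
            else options ++ [PySem.List.pyGetD (t :: rest) i ""]) ([] ++ [t])
        = (PySem.List.pyRange 1 ((t :: rest).length : Int) 1).foldl
          (fun options i =>
            (fun (os : List String) (e : String) =>
              if ¬ (PySem.Str.startswith e "-") then
                pvAppendLast os (String.ofList (' ' :: e.toList))
              else os ++ [e]) options (PySem.List.pyGetD (t :: rest) i "")) ([] ++ [t]) := by
      apply PySem.List.foldl_congr_mem
      intro acc i hi
      have h1 : (1 : Int) ≤ i := ((PySem.List.mem_pyRange_one).1 hi).1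
      by_cases hs : PySem.Str.startswith (PySem.List.pyGetD (t :: rest) i "") "-" = true
      · have hs' : PySem.Chars.startswith (PySem.List.pyGetD (t :: rest) i "").toList ['-'] = true := by
          simpa using hs
        simp [hs']
      · have hs' : PySem.Chars.startswith (PySem.List.pyGetD (t :: rest) i "").toList ['-'] = false := by
          simpa using hs
        simp [hs', show (0:Int) < i by omega]
    simp only [zero_add]
    rw [hcongr, PySem.List.foldl_pyRange_pyGetD' (t :: rest) ""
      (fun os e =>
        if ¬ (PySem.Str.startswith e "-") then pvAppendLast os (String.ofList (' ' :: e.toList))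
        else os ++ [e]) ([] ++ [t]) (by norm_num)]
    simp [pvFoldA]

-- ===== VERDICT (by name: the statement is the Claim_ definition above) =====
theorem split_options_py_spec : Claim_equal_split_options_py := by
  intro arg _
  unfold Spec_split_options_py split_options_py_alt
  rw [pvPortA_eq arg]
  cases hel : PySem.Str.split₀ arg with
  | nil =>
    have hnorm : PySem.Str.join " " ([] : List String) = "" := by
      have h0 : (PySem.Str.join " " ([] : List String)).toList = [] := by
        simp [PySem.Chars.join, List.intercalate]
      exact String.toList_eq_nil_iff.mp h0
    simp [hnorm]
  | cons t rest =>
    have htoks := pvTokens arg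
    rw [hel] at htoks
    have hne : t.toList ≠ [] := (htoks t (by simp)).1
    have hnosp : ∀ c ∈ t.toList, c ≠ ' ' := (htoks t (by simp)).2
    have hnorm : (PySem.Str.join " " (t :: rest)).toList
        = t.toList ++ pvSepJoin (rest.map String.toList) := by
      have h1 : (PySem.Str.join " " (t :: rest)).toList
          = PySem.Chars.join (" ".toList) ((t :: rest).map String.toList) := by simp
      have h2 : (" " : String).toList = [' '] := rfl
      rw [h1, h2, List.map_cons, pvJoin_cons]
    have hnn : PySem.Str.join " " (t :: rest) ≠ "" := by
      intro h0
      have h3 := congrArg String.toList h0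
      rw [hnorm] at h3
      simp at h3
      exact hne (by rw [h3.1]; rfl)
    rw [if_neg hnn, hnorm, pvReSplitDash_copy t.toList hnosp [] _]
    have hmain := pvMain rest (fun u hu => htoks u (by simp [hu])) [] t
    simp only [List.nil_append] at hmain
    show pvFoldA [t] rest = _
    rw [hmain]
    simp
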